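-- pv_equiv track=rewrite | github.com/BuildACell/bioCRNpyler | biocrnpyler/sbmlutil.py | nameToSbmlId
-- ===== SOURCE A (Python) =====
-- def nameToSbmlId(name):
--     IdStream = []
--     count = 0
--     end = len(name)
--
--     if '0' <= name[count] and name[count] <= '9':
--         IdStream.append('x_')
--     if '*' in name:
--         IdStream.append('xx')
--     for count in range(0, end):
--         if (('0' <= name[count] and name[count] <= '9') or
--                 ('a' <= name[count] and name[count] <= 'z') or
--                 ('A' <= name[count] and name[count] <= 'Z')):
--             IdStream.append(name[count])
--         else:
--             IdStream.append('_')
--     Id = ''.join(IdStream)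
--     if (Id[len(Id) - 1] != '_'):
--         return Id
--
--     return Id
-- ===== SOURCE B (Python) =====
-- def nameToSbmlId(name):
--     prefix = 'x_' if '0' <= name[0] <= '9' else ''
--     if '*' in name:
--         prefix += 'xx'
--
--     def ok(c):
--         return '0' <= c <= '9' or 'a' <= c <= 'z' or 'A' <= c <= 'Z'
--
--     # Run-based segmentation: advance over maximal runs of same character class,
--     # copy alphanumeric runs wholesale by slicing, emit underscores for the rest.
--     parts = [prefix]
--     i, n = 0, len(name)
--     while i < n:
--         good = ok(name[i])
--         j = i + 1
--         while j < n and ok(name[j]) == good: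
--             j += 1
--         parts.append(name[i:j] if good else '_' * (j - i))
--         i = j
--     return ''.join(parts)
-- ===== Notes on version B (the rewrite author's own statement) =====
-- stated objective: alternative
-- what changed: A's single per-character classify-and-append loop into an IdStream list is replaced by run segmentation: an outer loop over maximal runs of same character class, copying alphanumeric runs wholesale by slicing and emitting a run of underscores for non-alphanumeric runs, joined at the end.
import Mathlib
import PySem

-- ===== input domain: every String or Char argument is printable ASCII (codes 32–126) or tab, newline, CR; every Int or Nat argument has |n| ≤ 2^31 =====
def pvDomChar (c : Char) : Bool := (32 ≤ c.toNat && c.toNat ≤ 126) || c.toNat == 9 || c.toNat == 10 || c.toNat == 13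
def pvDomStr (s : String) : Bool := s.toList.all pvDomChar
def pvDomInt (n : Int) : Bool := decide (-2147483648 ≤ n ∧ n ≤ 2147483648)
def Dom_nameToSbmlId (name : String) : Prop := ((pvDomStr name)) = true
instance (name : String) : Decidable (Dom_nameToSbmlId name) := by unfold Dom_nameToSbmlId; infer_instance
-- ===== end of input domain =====

-- B replaces A's per-character classify-and-append loop by run segmentation: an outer
-- loop over maximal runs of same character class, copying alphanumeric runs wholesale
-- and emitting runs of underscores for the rest (alternative decomposition, same cost).

-- ===== PORT A =====
-- literal transliteration of A; char comparisons are Python's code-point comparisons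
def nameToSbmlId (name : String) : String :=
  match name.toList with
  | [] => ""  -- name[0] raises IndexError here; excluded by Pre_nameToSbmlId
  | c0 :: _ =>
    let cs := name.toList
    let s1 : List (List Char) :=
      if 48 ≤ c0.toNat ∧ c0.toNat ≤ 57 then [['x', '_']] else []
    let s2 : List (List Char) :=
      if PySem.Chars.isIn ['*'] cs then s1 ++ [['x', 'x']] else s1
    let s3 : List (List Char) := cs.foldl (fun acc c =>
      acc ++ [if (48 ≤ c.toNat ∧ c.toNat ≤ 57) ∨ (97 ≤ c.toNat ∧ c.toNat ≤ 122) ∨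
                 (65 ≤ c.toNat ∧ c.toNat ≤ 90)
              then [c] else ['_']]) s2
    let idL := PySem.Chars.join [] s3
    if idL.getLastD ' ' ≠ '_' then String.ofList idL else String.ofList idL

-- ===== PORT B =====
-- B's `ok(c)`: ASCII digit / lowercase / uppercase (code-point range tests, same order)
def pvOkC (c : Char) : Bool :=
  decide ((48 ≤ c.toNat ∧ c.toNat ≤ 57) ∨ (97 ≤ c.toNat ∧ c.toNat ≤ 122) ∨
          (65 ≤ c.toNat ∧ c.toNat ≤ 90))

-- B's inner while loop: extend the run while the class matches; returns (run, rest)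
def pvTakeRun (good : Bool) : List Char → List Char × List Char
  | [] => ([], [])
  | c :: rest =>
    if pvOkC c = good then
      let p := pvTakeRun good rest
      (c :: p.1, p.2)
    else ([], c :: rest)

lemma pvTakeRun_len (good : Bool) : ∀ l : List Char, (pvTakeRun good l).2.length ≤ l.length := by
  intro l
  induction l with
  | nil => simp [pvTakeRun]
  | cons c rest ih =>
    simp only [pvTakeRun]
    split
    · exact Nat.le_succ_of_le ih
    · simp

-- B's outer while loop: one iteration per maximal run
def pvEmitRuns : List Char → List Char
  | [] => []
  | c :: rest =>
    let good := pvOkC c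
    let p := pvTakeRun good rest
    (if good then c :: p.1 else List.replicate (p.1.length + 1) '_') ++ pvEmitRuns p.2
termination_by l => l.length
decreasing_by
  simpa using Nat.lt_succ_of_le (pvTakeRun_len good rest)

def nameToSbmlId_alt (name : String) : String :=
  match name.toList with
  | [] => ""  -- name[0] raises IndexError here; excluded by Pre_nameToSbmlId
  | c0 :: _ =>
    let pre1 : List Char := if 48 ≤ c0.toNat ∧ c0.toNat ≤ 57 then ['x', '_'] else []
    let pre2 : List Char :=
      if PySem.Chars.isIn ['*'] name.toList then pre1 ++ ['x', 'x'] else pre1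
    String.ofList (pre2 ++ pvEmitRuns name.toList)

-- ===== PRECONDITION & SPEC =====
-- Pre_ excludes only the empty string, on which both Pythons raise IndexError at name[0].
def Pre_nameToSbmlId (name : String) : Prop := name.toList ≠ []
instance (name : String) : Decidable (Pre_nameToSbmlId name) := by unfold Pre_nameToSbmlId; infer_instance
def pvWitness_nameToSbmlId : String := "9ab*c!"

def Spec_nameToSbmlId (name : String) (out : String) : Prop := out = nameToSbmlId_alt name
instance (name : String) (out : String) : Decidable (Spec_nameToSbmlId name out) := by unfold Spec_nameToSbmlId; infer_instance

-- ===== CLAIM (what is proved, stated in full; the proofs are below) =====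
def Claim_equal_nameToSbmlId : Prop := ∀ (name : String), Dom_nameToSbmlId name → Pre_nameToSbmlId name → Spec_nameToSbmlId name (nameToSbmlId name)

-- ===== LEMMAS AND PROOFS =====

def pvF (c : Char) : Char := if pvOkC c then c else '_'

lemma pvTakeRun_append (good : Bool) (l : List Char) :
    (pvTakeRun good l).1 ++ (pvTakeRun good l).2 = l := by
  induction l with
  | nil => simp [pvTakeRun]
  | cons c rest ih =>
    simp only [pvTakeRun]
    split
    · simpa using ih
    · simp

lemma pvTakeRun_mem (good : Bool) (l : List Char) :
    ∀ c ∈ (pvTakeRun good l).1, pvOkC c = good := by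
  induction l with
  | nil => simp [pvTakeRun]
  | cons c rest ih =>
    simp only [pvTakeRun]
    split
    · intro d hd
      rcases List.mem_cons.mp hd with h | h
      · subst h; assumption
      · exact ih d h
    · simp

-- the run loop computes exactly the per-character map
lemma pvEmitRuns_eq_map : ∀ l : List Char, pvEmitRuns l = l.map pvF := by
  intro l
  induction hn : l.length using Nat.strong_induction_on generalizing l with
  | _ n ih =>
    cases l with
    | nil => simp [pvEmitRuns]
    | cons c rest =>
      rw [pvEmitRuns]
      have hsplit := pvTakeRun_append (pvOkC c) rest
      have hrest2 : (pvTakeRun (pvOkC c) rest).2.length < n := by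
        subst hn
        simpa using Nat.lt_succ_of_le (pvTakeRun_len (pvOkC c) rest)
      have ih2 := ih _ hrest2 (pvTakeRun (pvOkC c) rest).2 rfl
      have hrun : (pvTakeRun (pvOkC c) rest).1.map pvF =
          if pvOkC c then (pvTakeRun (pvOkC c) rest).1
          else List.replicate (pvTakeRun (pvOkC c) rest).1.length '_' := by
        have hm := pvTakeRun_mem (pvOkC c) rest
        by_cases hg : pvOkC c
        · rw [if_pos hg]
          apply List.map_congr_left (f := pvF) (g := id) (h := fun d hd => by
            simp [pvF, hm d hd, hg]) |>.trans (List.map_id _)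
        · rw [if_neg hg]
          rw [List.eq_replicate_iff]
          refine ⟨by simp, ?_⟩
          intro d hd
          rcases List.mem_map.mp hd with ⟨e, he, rfl⟩
          simp [pvF, hm e he, eq_false_of_ne_true hg]
      calc (if pvOkC c then c :: (pvTakeRun (pvOkC c) rest).1
            else List.replicate ((pvTakeRun (pvOkC c) rest).1.length + 1) '_') ++
              pvEmitRuns (pvTakeRun (pvOkC c) rest).2
          = (pvF c :: (pvTakeRun (pvOkC c) rest).1.map pvF) ++
              (pvTakeRun (pvOkC c) rest).2.map pvF := by
            rw [ih2, hrun]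
            by_cases hg : pvOkC c <;> simp [pvF, hg, List.replicate_succ]
        _ = (c :: rest).map pvF := by
            rw [List.map_cons, List.cons_append, ← List.map_append, hsplit]

lemma pv_join_nil_eq_flatten (l : List (List Char)) :
    PySem.Chars.join [] l = l.flatten := by
  induction l with
  | nil => rfl
  | cons x xs ih =>
    cases xs with
    | nil => simp [PySem.Chars.join, List.intercalate]
    | cons y ys =>
      simp only [PySem.Chars.join, List.intercalate, List.intersperse] at *
      simp_all

lemma pv_foldl_push {α β : Type} (f : α → β) :
    ∀ (cs : List α) (init : List β),
      cs.foldl (fun acc c => acc ++ [f c]) init = init ++ cs.map f := by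
  intro cs
  induction cs with
  | nil => simp
  | cons c cs ih => intro init; simp [List.foldl_cons, ih]

lemma pv_flatten_ite (p : Char → Prop) [DecidablePred p] (l : List Char) :
    (l.map (fun c => if p c then [c] else ['_'])).flatten =
      l.map (fun c => if p c then c else '_') := by
  induction l with
  | nil => rfl
  | cons c cs ih => by_cases h : p c <;> simp [h, ih]

-- ===== VERDICT (by name: the statement is the Claim_ definition above) =====
theorem nameToSbmlId_spec : Claim_equal_nameToSbmlId := by
  intro name hdom hpre
  unfold Spec_nameToSbmlId nameToSbmlId nameToSbmlId_alt
  cases hcs : name.toList with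
  | nil => exact absurd hcs hpre
  | cons c0 rest =>
    simp only [ite_self]
    rw [pv_foldl_push, pv_join_nil_eq_flatten, List.flatten_append, pv_flatten_ite,
        pvEmitRuns_eq_map]
    have hmap : (c0 :: rest).map
        (fun c => if (48 ≤ c.toNat ∧ c.toNat ≤ 57) ∨ (97 ≤ c.toNat ∧ c.toNat ≤ 122) ∨
            (65 ≤ c.toNat ∧ c.toNat ≤ 90) then c else '_') = (c0 :: rest).map pvF := by
      apply List.map_congr_left
      intro c _
      simp [pvF, pvOkC]
    rw [hmap]
    congr 1
    by_cases hd : 48 ≤ c0.toNat ∧ c0.toNat ≤ 57 <;>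
      by_cases hs : PySem.Chars.isIn ['*'] (c0 :: rest) = true <;>
      simp [hd, hs]
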